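-- pv_equiv track=rewrite | github.com/iamraufodilov/Auto-Correct | Auto Correction Implementation/auto_correct_model.py | switch
-- ===== SOURCE A (Python) =====
-- def switch(word):
--     sw = []
--     sp = []
--     l=len(word)
--     for i in range(l):
--         sp.append((word[:i],word[i:]))
--     sw = [j + k[1] + k[0] + k[2:] for j,k in sp if len(k) >= 2]
--     return sw
-- ===== SOURCE B (Python) =====
-- def switch(word):
--     # In-place transposition: keep one mutable char list, swap the pair,
--     # record the join, swap back -- no slicing, no split table.
--     cs = list(word)
--     out = []
--     for i in range(len(cs) - 1):
--         cs[i], cs[i + 1] = cs[i + 1], cs[i]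
--         out.append(''.join(cs))
--         cs[i], cs[i + 1] = cs[i + 1], cs[i]
--     return out
-- ===== Notes on version B (the rewrite author's own statement) =====
-- stated objective: alternative
-- what changed: B replaces A's build-all-splits-then-filter-and-slice pipeline with one mutable char list that is swapped in place, joined, and swapped back at each position -- no slicing and no split table.
import Mathlib
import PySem

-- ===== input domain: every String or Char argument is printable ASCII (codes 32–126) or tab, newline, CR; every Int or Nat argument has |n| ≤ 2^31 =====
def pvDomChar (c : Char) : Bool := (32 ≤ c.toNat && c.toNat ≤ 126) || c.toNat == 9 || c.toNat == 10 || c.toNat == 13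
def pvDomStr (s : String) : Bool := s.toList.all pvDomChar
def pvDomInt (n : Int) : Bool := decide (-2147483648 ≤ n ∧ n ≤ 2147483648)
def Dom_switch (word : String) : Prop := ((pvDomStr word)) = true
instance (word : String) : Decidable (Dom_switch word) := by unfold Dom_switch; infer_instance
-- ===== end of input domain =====

-- B keeps one mutable char list, swapping each adjacent pair in place and back, instead of A.s split table + slices; objective: alternative.

-- ===== PORT A =====
-- A: build sp = [(word[:i], word[i:]) for i in range(len(word))] by an appending loop,
-- then sw = [j + k[1] + k[0] + k[2:] for j,k in sp if len(k) >= 2].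
-- k[1]/k[0] are ported with pyGetD (exact here: the 'len(k) >= 2' filter guarantees both indices are in range).
def switch (word : String) : List String :=
  let cs := word.toList
  let l : Int := (cs.length : Int)
  let sp : List (List Char × List Char) :=
    (PySem.List.pyRange 0 l 1).foldl
      (fun acc i => acc ++ [(PySem.List.slice cs none (some i), PySem.List.slice cs (some i) none)]) []
  (sp.filter (fun jk => decide ((jk.2.length : Int) ≥ 2))).map
    (fun jk => String.ofList (jk.1 ++ [PySem.List.pyGetD jk.2 1 ' '] ++ [PySem.List.pyGetD jk.2 0 ' ']
      ++ PySem.List.slice jk.2 (some 2) none))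

-- ===== PORT B =====
-- B: cs = list(word); for i in range(len(cs)-1): swap cs[i],cs[i+1]; append ''.join(cs); swap back.
-- The simultaneous assignment 'cs[i],cs[i+1] = cs[i+1],cs[i]' becomes two List.set with the values
-- read first (getD is exact: the loop keeps i+1 < len(cs)).
def pvStep (st : List Char × List String) (i : Nat) : List Char × List String :=
  let cs := st.1
  let cs1 := (cs.set i (cs.getD (i + 1) ' ')).set (i + 1) (cs.getD i ' ')
  let out := st.2 ++ [String.ofList cs1]
  ((cs1.set i (cs1.getD (i + 1) ' ')).set (i + 1) (cs1.getD i ' '), out)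

def switch_alt (word : String) : List String :=
  let cs := word.toList
  ((List.range (cs.length - 1)).foldl pvStep (cs, [])).2

-- ===== PRECONDITION & SPEC =====
def Spec_switch (word : String) (out : List String) : Prop := out = switch_alt word
instance (word : String) (out : List String) : Decidable (Spec_switch word out) := by unfold Spec_switch; infer_instance

-- ===== CLAIM (what is proved, stated in full; the proofs are below) =====
def Claim_equal_switch : Prop := ∀ (word : String), Dom_switch word → Spec_switch word (switch word)

-- ===== LEMMAS AND PROOFS =====

-- the common normal form: for each i < len-1, take i ++ swapped pair ++ drop (i+2)
def pvSpecList (cs : List Char) : List (List Char) :=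
  (List.range (cs.length - 1)).map
    (fun i => cs.take i ++ [(cs.drop i).getD 1 ' ', (cs.drop i).getD 0 ' '] ++ cs.drop (i + 2))

-- range(n) filtered by 'k < m' is range(m) when m ≤ n
theorem pv_filter_range_lt (n m : Nat) (h : m ≤ n) :
    (List.range n).filter (fun k => decide (k < m)) = List.range m := by
  induction n with
  | zero => simp; omega
  | succ n ih =>
    rcases Nat.lt_or_ge m (n+1) with hm | hm
    · rw [List.range_succ, List.filter_append, ih (by omega)]
      simp; omega
    · have hm' : m = n + 1 := by omega
      subst hm'
      exact List.filter_eq_self.mpr (fun k hk => by simp [List.mem_range] at hk ⊢; omega)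

theorem pv_switch_eq_spec (word : String) :
    switch word = (pvSpecList word.toList).map String.ofList := by
  unfold switch pvSpecList
  set cs := word.toList with hcs
  simp only [PySem.List.foldl_append_singleton_eq_map, List.nil_append,
    PySem.List.pyRange_one, List.filter_map, List.map_map]
  rw [show ((cs.length : Int) - 0).toNat = cs.length by omega]
  have hfil : (List.range cs.length).filter
      ((fun jk : List Char × List Char => decide ((jk.2.length : Int) ≥ 2)) ∘
        ((fun i => (PySem.List.slice cs none (some i), PySem.List.slice cs (some i) none)) ∘
          fun k : Nat => (0 : Int) + ↑k)) = List.range (cs.length - 1) := by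
    rw [← pv_filter_range_lt cs.length (cs.length - 1) (by omega)]
    apply List.filter_congr
    intro k hk
    simp [PySem.List.slice_from_natCast]
    omega
  rw [hfil]
  apply List.map_congr_left
  intro k hk
  simp only [List.mem_range] at hk
  simp only [Function.comp, zero_add, PySem.List.slice_to_natCast, PySem.List.slice_from_natCast]
  rw [show PySem.List.pyGetD (cs.drop k) 1 ' ' = (cs.drop k).getD 1 ' ' from
        PySem.List.pyGetD_ofNat' _ 1 ' ',
      show PySem.List.pyGetD (cs.drop k) 0 ' ' = (cs.drop k).getD 0 ' ' from
        PySem.List.pyGetD_ofNat' _ 0 ' ']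
  rw [show PySem.List.slice (cs.drop k) (some 2) none = (cs.drop k).drop 2 by
        rw [show (2:Int) = ((2:Nat):Int) from rfl, PySem.List.slice_from_natCast]]
  rw [List.drop_drop]
  simp

-- swapping positions i, i+1 equals take/pair/drop surgery
theorem pv_set_pair (cs : List Char) (i : Nat) (h : i + 1 < cs.length) :
    (cs.set i (cs.getD (i + 1) ' ')).set (i + 1) (cs.getD i ' ')
      = cs.take i ++ [(cs.drop i).getD 1 ' ', (cs.drop i).getD 0 ' '] ++ cs.drop (i + 2) := by
  apply List.ext_getElem (by simp; omega)
  intro k h1 h2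
  simp only [List.getElem_set, List.getD_eq_getElem?_getD, List.getElem?_drop,
    List.getElem_append, List.length_take, List.length_cons, List.length_append,
    List.length_nil]
  have hm : min i cs.length = i := by omega
  split_ifs <;> (try omega)
  case _ h1' h2' h3' =>
    -- k = i + 1: the pair's second slot
    have e : k - min i cs.length = 1 := by omega
    simp [e]
  case _ h1' h2' h3' h4' =>
    -- k = i: the pair's first slot
    have e : k - min i cs.length = 0 := by omega
    simp [e]
  case _ =>
    -- k < i: untouched prefix
    simp [List.getElem_take]
  case _ =>
    -- k ≥ i + 2: untouched suffix
    simp only [List.getElem_drop]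
    have e : i + 2 + (k - (min i cs.length + (0 + 1 + 1))) = k := by omega
    simp_rw [e]

theorem pv_set_restore (cs : List Char) (i : Nat) (h : i + 1 < cs.length) :
    ((((cs.set i (cs.getD (i + 1) ' ')).set (i + 1) (cs.getD i ' ')).set i
        (((cs.set i (cs.getD (i + 1) ' ')).set (i + 1) (cs.getD i ' ')).getD (i + 1) ' ')).set (i + 1)
        (((cs.set i (cs.getD (i + 1) ' ')).set (i + 1) (cs.getD i ' ')).getD i ' ')) = cs := by
  apply List.ext_getElem (by simp)
  intro k h1 h2
  simp only [List.getElem_set, List.getD_eq_getElem?_getD, List.getElem?_set, List.length_set]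
  split_ifs <;> simp_all <;> omega

theorem pvStep_eq (cs : List Char) (out : List String) (i : Nat) (h : i + 1 < cs.length) :
    pvStep (cs, out) i = (cs, out ++ [String.ofList
      (cs.take i ++ [(cs.drop i).getD 1 ' ', (cs.drop i).getD 0 ' '] ++ cs.drop (i + 2))]) := by
  simp only [pvStep, Prod.mk.injEq]
  exact ⟨pv_set_restore cs i h, by rw [pv_set_pair cs i h]⟩

theorem pv_loop (cs : List Char) (n : Nat) (hn : n ≤ cs.length - 1) (out : List String) :
    (List.range n).foldl pvStep (cs, out)
      = (cs, out ++ (pvSpecList cs |>.take n |>.map String.ofList)) := by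
  induction n generalizing out with
  | zero => simp
  | succ n ih =>
    have hlt : n + 1 < cs.length := by omega
    rw [List.range_succ, List.foldl_append, ih (by omega), List.foldl_cons, List.foldl_nil,
      pvStep_eq cs _ n hlt]
    have htake : (pvSpecList cs |>.take (n+1)) = (pvSpecList cs |>.take n)
        ++ [cs.take n ++ [(cs.drop n).getD 1 ' ', (cs.drop n).getD 0 ' '] ++ cs.drop (n + 2)] := by
      unfold pvSpecList
      rw [← List.map_take, ← List.map_take, List.take_succ_eq_append_getElem (by simp; omega)]
      simp
    rw [htake]
    simp

theorem pv_alt_eq_spec (word : String) :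
    switch_alt word = (pvSpecList word.toList).map String.ofList := by
  show ((List.range (word.toList.length - 1)).foldl pvStep (word.toList, [])).2
      = (pvSpecList word.toList).map String.ofList
  rw [pv_loop word.toList (word.toList.length - 1) (le_refl _) []]
  simp [pvSpecList]

-- ===== VERDICT (by name: the statement is the Claim_ definition above) =====
theorem switch_spec : Claim_equal_switch := by
  intro word _
  unfold Spec_switch
  rw [pv_switch_eq_spec, pv_alt_eq_spec]
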